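-- pv_equiv track=rewrite | github.com/chyanju/Poe | trinity/reviewer/watson4vis_optimal.py | light_up
-- ===== SOURCE A (Python) =====
-- def light_up(arg_question_tokens, arg_qflags, arg_token):
--
--     # first phase: find 0
--     is_found = False
--     for i in range(len(arg_question_tokens)):
--         if arg_token==arg_question_tokens[i]:
--             is_found = True
--             if arg_qflags[i]==0:
--                 arg_qflags[i] += 1
--                 return True
--         # for phrases like "more or less", split it first before matching
--         for zz in str(arg_token).split(" "):
--             if zz==arg_question_tokens[i]:
--                 is_found = True
--                 if arg_qflags[i]==0:
--                     arg_qflags[i] += 1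
--                     # don't return, finish all
--         # and return here instead after processing all the zz tokens
--         if is_found:
--             return True
--
--     if not is_found:
--         raise NotImplementedError("light_up procedure can't find a matching token for {} in list {}.".format(
--             arg_token, arg_question_tokens
--         ))
--         # return False
--
--     # if you reach here, it means:
--     # - all the matching tokens have value >0
--     # then find the first position and +1
--     for i in range(len(arg_question_tokens)):
--         # if arg_token.lower()==arg_question_tokens[i].lower():
--         if str(arg_token).lower()==str(arg_question_tokens[i]).lower():
--             arg_qflags[i] += 1
--             return True
--
--     # hmm... you can't reach here
--     raise NotImplementedError("You can't reach here. Check your implementation.")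
-- ===== SOURCE B (Python) =====
-- def light_up(arg_question_tokens, arg_qflags, arg_token):
--     # probe per candidate key, take the earliest hit
--     keys = [arg_token] + str(arg_token).split(" ")
--     positions = [arg_question_tokens.index(k) for k in keys if k in arg_question_tokens]
--     if not positions:
--         raise NotImplementedError("light_up procedure can't find a matching token for {} in list {}.".format(
--             arg_token, arg_question_tokens
--         ))
--     win = min(positions)
--     if arg_qflags[win] == 0:
--         arg_qflags[win] += 1
--     return True
-- ===== Notes on version B (the rewrite author's own statement) =====
-- stated objective: alternative
-- what changed: A scans the token list once, testing each position against the token and each of its space-split words (with an inner per-word flag pass); B inverts the traversal: it builds the candidate key list [token] + token.split(' '), probes the question list once per key for that key's first position, and takes the minimum position as the winner.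
-- outside the precondition, e.g. on light_up(['b'], [0], 'a'): A raises NotImplementedError, B raises NotImplementedError; on light_up(['a'], [], 'a'): A raises IndexError, B raises IndexError
import Mathlib
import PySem

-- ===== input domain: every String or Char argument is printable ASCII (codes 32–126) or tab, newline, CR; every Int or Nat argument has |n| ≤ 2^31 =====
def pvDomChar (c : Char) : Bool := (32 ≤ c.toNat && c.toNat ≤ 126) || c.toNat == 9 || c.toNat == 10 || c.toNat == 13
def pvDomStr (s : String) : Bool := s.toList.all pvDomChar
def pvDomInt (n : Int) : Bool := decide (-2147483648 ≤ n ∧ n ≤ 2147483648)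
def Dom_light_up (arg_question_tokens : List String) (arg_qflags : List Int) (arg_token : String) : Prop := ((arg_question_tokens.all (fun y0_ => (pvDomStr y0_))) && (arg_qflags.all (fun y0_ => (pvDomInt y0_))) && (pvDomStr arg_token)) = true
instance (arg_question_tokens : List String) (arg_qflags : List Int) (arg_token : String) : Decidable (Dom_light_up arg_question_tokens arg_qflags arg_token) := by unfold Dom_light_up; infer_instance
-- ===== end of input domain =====

-- B replaces A's index-scan with per-candidate-key probes (first position of each key, earliest hit wins) —
-- objective: alternative decomposition, same cost. Both Pythons mutate arg_qflags identically (tested); the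
-- theorems here are about the returned Bool only.


-- ===== PORT A =====
-- inner 'for zz in str(arg_token).split(" ")' loop at index i: qv is arg_qflags[i] (none = IndexError,
-- raised when a zz matches and the flag is read); isf is the running is_found; mutation of arg_qflags
-- does not affect the returned Bool and is not modelled. Returns none exactly where Python raises.
def lightA_zz (t : String) (qv : Option Int) : List String → Bool → Option Bool
  | [], isf => some isf
  | zz :: rest, isf =>
    if zz == t then
      match qv with
      | none => none                         -- IndexError on arg_qflags[i]
      | some _ => lightA_zz t qv rest true
    else lightA_zz t qv rest isf

-- outer 'for i in range(len(arg_question_tokens))' loop: tokens and flags are consumed in lockstep,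
-- so flags.head? is arg_qflags[i]. Falling off the list (is_found still False) is the
-- NotImplementedError, modelled as false and excluded by Pre_. The second phase of A (the lowercase
-- rescan) is unreachable: the loop only completes with is_found == False, which raises first.
def lightA_go (token : String) (parts : List String) : List String → List Int → Bool
  | [], _ => false                           -- NotImplementedError (excluded by Pre_)
  | t :: ts, flags =>
    if token == t then
      match flags.head? with
      | none => false                        -- IndexError (excluded by Pre_)
      | some v =>
        if v = 0 then true
        else
          match lightA_zz t flags.head? parts true with
          | none => false
          | some isf => if isf then true else lightA_go token parts ts flags.tail
    else
      match lightA_zz t flags.head? parts false with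
      | none => false                        -- IndexError (excluded by Pre_)
      | some isf => if isf then true else lightA_go token parts ts flags.tail

def light_up (arg_question_tokens : List String) (arg_qflags : List Int) (arg_token : String) : Bool :=
  lightA_go arg_token ((PySem.Str.split? arg_token " ").getD []) arg_question_tokens arg_qflags
  -- split? is some: the separator " " is nonempty; .getD [] only totalizes

-- ===== PORT B =====
def light_up_alt (arg_question_tokens : List String) (arg_qflags : List Int) (arg_token : String) : Bool :=
  let keys := arg_token :: (PySem.Str.split? arg_token " ").getD []
  let positions := keys.filterMap (fun k =>
    if arg_question_tokens.contains k then PySem.List.index? arg_question_tokens k else none)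
  match PySem.List.min? positions (fun x => x) with
  | none => false                            -- NotImplementedError (excluded by Pre_)
  | some win =>
    match arg_qflags[win]? with
    | none => false                          -- IndexError (excluded by Pre_)
    | some _ => true

-- ===== PRECONDITION & SPEC =====
-- a token at index j matches: equal to arg_token or to one of its space-split words
def pvMatch (token t : String) : Bool := token == t || ((PySem.Str.split? token " ").getD []).contains t

-- Pre_: some token matches (else A raises NotImplementedError) and the first matching index is
-- inside arg_qflags (else A raises IndexError reading arg_qflags[i]).
def Pre_light_up (arg_question_tokens : List String) (arg_qflags : List Int) (arg_token : String) : Prop :=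
  ∃ i, i < arg_question_tokens.length ∧ i < arg_qflags.length ∧
    pvMatch arg_token (arg_question_tokens.getD i "") = true ∧
    ∀ j, j < i → pvMatch arg_token (arg_question_tokens.getD j "") = false
instance (arg_question_tokens : List String) (arg_qflags : List Int) (arg_token : String) : Decidable (Pre_light_up arg_question_tokens arg_qflags arg_token) := by unfold Pre_light_up; infer_instance

def pvWitness_light_up : List String × List Int × String := (["more", "less"], [0, 1], "more or less")

def Spec_light_up (arg_question_tokens : List String) (arg_qflags : List Int) (arg_token : String) (out : Bool) : Prop := out = light_up_alt arg_question_tokens arg_qflags arg_token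
instance (arg_question_tokens : List String) (arg_qflags : List Int) (arg_token : String) (out : Bool) : Decidable (Spec_light_up arg_question_tokens arg_qflags arg_token out) := by unfold Spec_light_up; infer_instance

-- ===== CLAIM (what is proved, stated in full; the proofs are below) =====
def Claim_equal_light_up : Prop := ∀ (arg_question_tokens : List String) (arg_qflags : List Int) (arg_token : String), Dom_light_up arg_question_tokens arg_qflags arg_token → Pre_light_up arg_question_tokens arg_qflags arg_token → Spec_light_up arg_question_tokens arg_qflags arg_token (light_up arg_question_tokens arg_qflags arg_token)

-- ===== LEMMAS AND PROOFS =====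

-- the zz loop, summarized: error iff a zz matches and the flag read fails; else is_found ∨ a zz matched
lemma lightA_zz_eq (t : String) (qv : Option Int) (parts : List String) (isf : Bool) :
    lightA_zz t qv parts isf =
      if parts.contains t then (match qv with | none => none | some _ => some true)
      else some isf := by
  induction parts generalizing isf with
  | nil => simp [lightA_zz]
  | cons zz rest ih =>
    by_cases h : zz = t
    · subst h
      cases qv <;> simp [lightA_zz, ih]
    · have h1 : (zz == t) = false := by simp [h]
      have h3 : ¬ t = zz := fun e => h e.symm
      simp [lightA_zz, h1, h3, ih]

-- A's loop returns true at the first matching index, false if none / flag read fails there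
lemma lightA_go_eq (token : String) (parts : List String) (ts : List String) (flags : List Int) :
    lightA_go token parts ts flags =
      match List.findIdx? (fun t => token == t || parts.contains t) ts with
      | none => false
      | some w => (flags[w]?).isSome := by
  induction ts generalizing flags with
  | nil => simp [lightA_go]
  | cons t rest ih =>
    have h0 : flags[0]? = flags.head? := by cases flags <;> simp
    have htail : ∀ (w : Nat), flags[w+1]? = (flags.tail)[w]? := by
      intro w; cases flags <;> simp
    rw [List.findIdx?_cons]
    by_cases he : (token == t) = true
    · rw [if_pos (by simp [he])]
      show lightA_go token parts (t :: rest) flags = (flags[0]?).isSome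
      rw [h0]
      simp only [lightA_go, if_pos he]
      cases hh : flags.head? with
      | none => simp
      | some v =>
        by_cases hv : v = 0
        · simp [hv]
        · rw [lightA_zz_eq]
          by_cases hc : parts.contains t = true
          · rw [if_pos hc]; simp
          · rw [if_neg (by simpa using hc)]; simp
    · by_cases hc : parts.contains t = true
      · have hcm : t ∈ parts := by simpa using hc
        rw [if_pos (by simp [he, hcm])]
        show lightA_go token parts (t :: rest) flags = (flags[0]?).isSome
        rw [h0]
        simp only [lightA_go, if_neg he]
        rw [lightA_zz_eq, if_pos hc]
        cases hh : flags.head? <;> simp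
      · have hcm : t ∉ parts := by simpa using hc
        rw [if_neg (by simp [he, hcm])]
        simp only [lightA_go, if_neg he]
        rw [lightA_zz_eq, if_neg (by simpa using hc)]
        show lightA_go token parts rest flags.tail = _
        rw [ih]
        cases hf : List.findIdx? (fun t => token == t || parts.contains t) rest with
        | none => simp
        | some w => simp only [Option.map_some, htail w]

-- B's core: the minimum over the candidate keys' first positions IS the first index whose
-- token is one of the keys
lemma minPositions_eq_findIdx (keys tokens : List String) :
    PySem.List.min? (keys.filterMap (fun k =>
        if tokens.contains k then PySem.List.index? tokens k else none)) (fun x => x)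
      = List.findIdx? (fun t => keys.contains t) tokens := by
  set positions := keys.filterMap (fun k =>
      if tokens.contains k then PySem.List.index? tokens k else none) with hpos
  have hmem : ∀ x ∈ positions, ∃ hx : x < tokens.length, tokens[x] ∈ keys ∧
      ∀ j (hj : j < x), tokens[j] ≠ tokens[x] := by
    intro x hx
    rw [hpos, List.mem_filterMap] at hx
    obtain ⟨k, hk, hkx⟩ := hx
    by_cases hc : tokens.contains k
    · rw [if_pos hc] at hkx
      obtain ⟨hlt, heq, hfirst⟩ := PySem.List.getElem_of_index?_eq_some hkx
      exact ⟨hlt, by rw [heq]; exact hk, by rw [heq]; exact hfirst⟩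
    · rw [if_neg hc] at hkx; exact absurd hkx (by simp)
  cases hf : List.findIdx? (fun t => keys.contains t) tokens with
  | none =>
    rw [List.findIdx?_eq_none_iff] at hf
    have : positions = [] := by
      rw [hpos, List.filterMap_eq_nil_iff]
      intro k hk
      by_cases hc : tokens.contains k
      · exfalso
        have hkmem : k ∈ tokens := by simpa using hc
        have h2 := hf k hkmem
        simp only [List.contains_eq_mem, decide_eq_false_iff_not] at h2
        exact h2 hk
      · simpa using hc
    rw [this]
    exact (PySem.List.min?_eq_none_iff [] _).mpr rfl
  | some w =>
    rw [List.findIdx?_eq_some_iff_getElem] at hf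
    obtain ⟨hw, hpw, hmin⟩ := hf
    have hkmem : tokens[w] ∈ keys := by simpa using hpw
    -- w is a member of positions (via the key tokens[w])
    have hwpos : w ∈ positions := by
      rw [hpos, List.mem_filterMap]
      refine ⟨tokens[w], hkmem, ?_⟩
      have hc : tokens.contains tokens[w] := by
        simp
      rw [if_pos hc]
      -- index? finds some m ≤ w with tokens[m] = tokens[w]; minimality of w forces m = w
      have hsome : (PySem.List.index? tokens tokens[w]).isSome := by
        rw [PySem.List.index?_isSome_iff]; exact List.getElem_mem hw
      obtain ⟨m, hm⟩ := Option.isSome_iff_exists.mp hsome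
      obtain ⟨hml, hmeq, hmfirst⟩ := PySem.List.getElem_of_index?_eq_some hm
      have hmw : m = w := by
        rcases lt_trichotomy m w with h | h | h
        · exfalso
          have := hmin m h
          rw [hmeq] at this
          simp [hkmem] at this
        · exact h
        · exact absurd rfl (hmfirst w h)
      rw [hmw] at hm; exact hm
    -- every position is ≥ w
    have hlb : ∀ x ∈ positions, w ≤ x := by
      intro x hx
      obtain ⟨hxl, hxk, _⟩ := hmem x hx
      by_contra hle
      have hlt : x < w := Nat.lt_of_not_le hle
      have := hmin x hlt
      simp [hxk] at this
    -- min? returns some m; m ∈ positions and m is a lower bound, so m = w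
    have hne : positions ≠ [] := fun h => by rw [h] at hwpos; exact absurd hwpos (by simp)
    cases hm : PySem.List.min? positions (fun x => x) with
    | none => exact absurd ((PySem.List.min?_eq_none_iff positions _).mp hm) hne
    | some m =>
      have h1 : m ∈ positions := PySem.List.min?_mem hm
      have h2 : m ≤ w := PySem.List.min?_isMin hm w hwpos
      have h3 : w ≤ m := hlb m h1
      have : m = w := Nat.le_antisymm h2 h3
      rw [this]

-- the two matching predicates agree pointwise
lemma pred_eq (token : String) (parts : List String) :
    (fun t => token == t || parts.contains t) = (fun t => (token :: parts).contains t) := by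
  funext t
  simp only [List.contains_cons]
  by_cases h : token = t
  · simp [h]
  · have h1 : (token == t) = false := by simp [h]
    have h2 : (t == token) = false := by simp [Ne.symm h]
    rw [h1, h2]

-- the two ports agree on EVERY input (error paths included)
lemma ports_agree (tokens : List String) (qflags : List Int) (token : String) :
    light_up tokens qflags token = light_up_alt tokens qflags token := by
  unfold light_up light_up_alt
  rw [lightA_go_eq, pred_eq]
  dsimp only
  rw [minPositions_eq_findIdx]
  cases List.findIdx? (fun t => (token :: (PySem.Str.split? token " ").getD []).contains t) tokens with
  | none => rfl
  | some w =>
    show (qflags[w]?).isSome = (match qflags[w]? with | none => false | some _ => true)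
    cases qflags[w]? <;> rfl

-- ===== VERDICT (by name: the statement is the Claim_ definition above) =====
theorem light_up_spec : Claim_equal_light_up := by
  intro tokens qflags token _ _
  unfold Spec_light_up
  exact ports_agree tokens qflags token
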